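-- pv_equiv track=rewrite | github.com/NiklasZ/BattleshipAI | project/src/ai/board_info.py | ships_still_afloat
-- ===== SOURCE A (Python) =====
-- def ships_still_afloat(ships, board):
--     """
--     Calculates how many of the available ships on the board have not yet been sunk.
--     :param ships: a list of ships by length.
--     :param board: the board to be inspected.
--     :return: the list of ships not yet sunk.
--     """
--     afloat = []
--     ships_removed = []
--     for k in range(len(ships)):  # For every ship
--         afloat.append(ships[k])  # Add it to the list of afloat ships
--         ships_removed.append(False)  # Set its removed from afloat list to false
--     for i in range(len(board)):
--         for j in range(len(board[0])):  # For every grid on the board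
--             for k in range(len(ships)):  # For every ship
--                 if str(k) in board[i][j] and not ships_removed[
--                     k]:  # If we can see the ship number on our opponent's board and we haven't already removed it from the afloat list
--                     afloat.remove(ships[
--                                       k])  # Remove that ship from the afloat list (we can only see an opponent's ship number when the ship has been sunk)
--                     ships_removed[
--                         k] = True  # Record that we have now removed this ship so we know not to try and remove it again
--     return afloat  # Return the list of ships still afloat
-- ===== SOURCE B (Python) =====
-- def ships_still_afloat(ships, board):
--     # Phase 1: flatten the scanned region of the board (rows x width of first row),
--     # then determine, per ship index, whether its number is visible anywhere.
--     width = len(board[0]) if board else 0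
--     cells = [board[i][j] for i in range(len(board)) for j in range(width)]
--     sunk_lengths = [ships[k] for k in range(len(ships))
--                     if any(str(k) in cell for cell in cells)]
--     # Phase 2: a budget counter of sunk lengths replicates list.remove's
--     # leftmost-occurrence deletion in a single pass over ships.
--     budget = {}
--     for length in sunk_lengths:
--         budget[length] = budget.get(length, 0) + 1
--     afloat = []
--     for length in ships:
--         if budget.get(length, 0) > 0:
--             budget[length] -= 1
--         else:
--             afloat.append(length)
--     return afloat
-- ===== Notes on version B (the rewrite author's own statement) =====
-- stated objective: alternative
-- what changed: Replaces A's stateful triple loop that mutates the afloat list via list.remove with a two-phase pipeline: flatten the scanned board region once, compute per-ship sunk flags with any(), then reproduce the leftmost-removal semantics with a single budget-counter pass over ships.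
-- outside the precondition, e.g. on ships_still_afloat([], [['', ''], ['ycx9']]): A returns [], B raises IndexError
import Mathlib
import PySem

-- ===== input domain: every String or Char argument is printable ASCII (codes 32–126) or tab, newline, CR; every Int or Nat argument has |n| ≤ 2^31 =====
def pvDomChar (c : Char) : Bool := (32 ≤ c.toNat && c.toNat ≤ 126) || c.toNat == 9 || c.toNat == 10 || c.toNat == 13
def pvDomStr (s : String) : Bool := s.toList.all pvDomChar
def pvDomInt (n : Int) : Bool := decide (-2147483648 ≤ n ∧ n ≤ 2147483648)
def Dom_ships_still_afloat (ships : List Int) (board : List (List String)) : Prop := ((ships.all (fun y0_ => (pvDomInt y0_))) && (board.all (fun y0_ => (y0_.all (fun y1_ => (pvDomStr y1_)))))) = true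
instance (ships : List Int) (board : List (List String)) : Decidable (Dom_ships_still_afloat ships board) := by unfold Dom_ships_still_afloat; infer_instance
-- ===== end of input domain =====

-- B replaces A's stateful triple loop (mutating the afloat list via list.remove) by a
-- two-phase pipeline: flatten the scanned region, compute per-ship sunk flags, then a
-- single budget-counter pass over ships; equal return value on Pre_ (no mutation involved).

-- ===== PORT A =====
def ships_still_afloat (ships : List Int) (board : List (List String)) : List Int :=
  -- afloat = []; ships_removed = []; for k in range(len(ships)): append ships[k]; append False
  let init : List Int × List Bool :=
    (PySem.List.pyRange 0 (PySem.List.len ships) 1).foldl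
      (fun st k => (st.1 ++ [PySem.List.pyGetD ships k 0], st.2 ++ [false])) ([], [])
  -- for i in range(len(board)): for j in range(len(board[0])): for k in range(len(ships)): …
  -- board[i], board[0], board[i][j], ships_removed[k], ships[k] are always in range under
  -- Pre_ (pyGetD is the faithful total form there); afloat.remove(ships[k]) cannot raise
  -- ValueError (each index k is removed at most once), so remove? is always `some` — getD
  -- is its faithful total form.
  let fin : List Int × List Bool :=
    (PySem.List.pyRange 0 (PySem.List.len board) 1).foldl (fun st i =>
      (PySem.List.pyRange 0 (PySem.List.len (PySem.List.pyGetD board 0 [])) 1).foldl (fun st j =>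
        (PySem.List.pyRange 0 (PySem.List.len ships) 1).foldl (fun st k =>
          if PySem.Str.isIn (PySem.Int.toStr k)
               (PySem.List.pyGetD (PySem.List.pyGetD board i []) j "")
             && !(PySem.List.pyGetD st.2 k false) then
            ((PySem.List.remove? st.1 (PySem.List.pyGetD ships k 0)).getD st.1,
             PySem.List.pySetD st.2 k true)
          else st) st) st) init
  fin.1

-- ===== PORT B =====
def ships_still_afloat_alt (ships : List Int) (board : List (List String)) : List Int :=
  -- width = len(board[0]) if board else 0
  let width : Int := if board = [] then 0 else PySem.List.len (PySem.List.pyGetD board 0 [])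
  -- cells = [board[i][j] for i in range(len(board)) for j in range(width)]
  let cells : List String :=
    (PySem.List.pyRange 0 (PySem.List.len board) 1).flatMap (fun i =>
      (PySem.List.pyRange 0 width 1).map (fun j =>
        PySem.List.pyGetD (PySem.List.pyGetD board i []) j ""))
  -- sunk_lengths = [ships[k] for k in range(len(ships)) if any(str(k) in cell for cell in cells)]
  let sunkLengths : List Int :=
    ((PySem.List.pyRange 0 (PySem.List.len ships) 1).filter (fun k =>
      cells.any (fun cell => PySem.Str.isIn (PySem.Int.toStr k) cell))).map
      (fun k => PySem.List.pyGetD ships k 0)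
  -- budget = {}; for length in sunk_lengths: budget[length] = budget.get(length, 0) + 1
  let budget : PySem.Dict Int Int :=
    sunkLengths.foldl (fun d length => d.insert length (d.getD length 0 + 1)) PySem.Dict.empty
  -- afloat = []; for length in ships: if budget.get(length,0) > 0: budget[length] -= 1 else append
  let fin : PySem.Dict Int Int × List Int :=
    ships.foldl (fun st length =>
      if st.1.getD length 0 > 0 then (st.1.insert length (st.1.getD length 0 - 1), st.2)
      else (st.1, st.2 ++ [length])) (budget, [])
  fin.2

-- ===== PRECONDITION & SPEC =====
-- Pre_ excludes the jagged boards (some row shorter than the first row): there Python A raises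
-- IndexError when ships is non-empty, and when ships is empty A skips every cell access and
-- returns [] while B's cell flattening still raises IndexError.
def Pre_ships_still_afloat (ships : List Int) (board : List (List String)) : Prop :=
  ∀ row ∈ board, (board.headD []).length ≤ row.length
instance (ships : List Int) (board : List (List String)) : Decidable (Pre_ships_still_afloat ships board) := by unfold Pre_ships_still_afloat; infer_instance
def pvWitness_ships_still_afloat : List Int × List (List String) :=
  ([2, 3, 2], [["0", "x"], ["2 ", ""]])
def Spec_ships_still_afloat (ships : List Int) (board : List (List String)) (out : List Int) : Prop := out = ships_still_afloat_alt ships board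
instance (ships : List Int) (board : List (List String)) (out : List Int) : Decidable (Spec_ships_still_afloat ships board out) := by unfold Spec_ships_still_afloat; infer_instance

-- ===== CLAIM (what is proved, stated in full; the proofs are below) =====
def Claim_equal_ships_still_afloat : Prop := ∀ (ships : List Int) (board : List (List String)), Dom_ships_still_afloat ships board → Pre_ships_still_afloat ships board → Spec_ships_still_afloat ships board (ships_still_afloat ships board)

-- ===== LEMMAS AND PROOFS =====

-- `remove the leftmost occurrence of each value v, (c v) times` in one pass.
def rmMany : List Int → (Int → Nat) → List Int
  | [], _ => []
  | x :: xs, c =>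
      if 0 < c x then rmMany xs (fun v => if v = x then c v - 1 else c v)
      else x :: rmMany xs c

-- number of indices k < ships.length with r[k] = true and ships[k] = v
def cOf (ships : List Int) (r : List Bool) (v : Int) : Nat :=
  (List.range ships.length).countP (fun k => r.getD k false && ships.getD k 0 == v)

-- visibility of ship index k in a cell
def pvVis (k : Nat) (cell : String) : Bool := PySem.Str.isIn (PySem.Int.toStr (k : Int)) cell

-- the per-(cell, k) step of A's innermost loop, on the (afloat, removed) state
def pvStep (ships : List Int) (st : List Int × List Bool) (q : String × Int) : List Int × List Bool :=
  if PySem.Str.isIn (PySem.Int.toStr q.2) q.1 && !(PySem.List.pyGetD st.2 q.2 false) then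
    ((PySem.List.remove? st.1 (PySem.List.pyGetD ships q.2 0)).getD st.1,
     PySem.List.pySetD st.2 q.2 true)
  else st

-- the same step, on the removed flags alone
def pvFlagStep (r : List Bool) (q : String × Int) : List Bool :=
  if PySem.Str.isIn (PySem.Int.toStr q.2) q.1 && !(PySem.List.pyGetD r q.2 false) then
    PySem.List.pySetD r q.2 true
  else r


-- the per-cell fold of the innermost k-loop, as a function of the cell string
def pvCellF (ships : List Int) (st : List Int × List Bool) (cell : String) : List Int × List Bool :=
  (PySem.List.pyRange 0 (ships.length : Int) 1).foldl (fun st k => pvStep ships st (cell, k)) st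

-- the flattened (cell, k) pair sequence of A's two inner loops
def pvPairs (n : Nat) (C : List String) : List (String × Int) :=
  C.flatMap (fun cell => (PySem.List.pyRange 0 (n : Int) 1).map (fun k => (cell, k)))

-- the first loop of A builds (ships, [False]*len(ships))
lemma pv_init (ships : List Int) :
    (PySem.List.pyRange 0 (PySem.List.len ships) 1).foldl
      (fun st k => (st.1 ++ [PySem.List.pyGetD ships k 0], st.2 ++ [false]))
      (([], []) : List Int × List Bool)
    = (ships, List.replicate ships.length false) := by
  have aux : ∀ (xs : List Int) (a : List Int) (b : List Bool),
      xs.foldl (fun (st : List Int × List Bool) x => (st.1 ++ [x], st.2 ++ [false])) (a, b)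
        = (a ++ xs, b ++ List.replicate xs.length false) := by
    intro xs
    induction xs with
    | nil => intro a b; simp
    | cons x xs ih =>
        intro a b
        simp only [List.foldl_cons, ih, List.length_cons, List.replicate_succ]
        simp
  simp only [PySem.List.len_eq]
  rw [PySem.List.foldl_pyRange_zero_pyGetD' ships 0
        (fun (st : List Int × List Bool) x => (st.1 ++ [x], st.2 ++ [false])) ([], [])]
  simpa using aux ships [] []

lemma pv_countP_range_bump {n k : Nat} (hk : k < n) (p q : Nat → Bool)
    (h : ∀ j, j ≠ k → p j = q j) (hpk : p k = false) (hqk : q k = true) :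
    (List.range n).countP q = (List.range n).countP p + 1 := by
  induction n with
  | zero => omega
  | succ n ih =>
      rw [List.range_succ, List.countP_append, List.countP_append]
      by_cases hkn : k = n
      · subst hkn
        have hcong : (List.range k).countP q = (List.range k).countP p := by
          apply List.countP_congr
          intro j hj
          have hj' : j ≠ k := by simp at hj; omega
          rw [h j hj']
        simp [hcong, List.countP_cons, hpk, hqk]
      · have hkn' : k < n := by omega
        have := ih hkn'
        have hn : p n = q n := h n (by omega)
        simp [List.countP_cons, ← hn]
        omega

lemma pv_count_eq (ships : List Int) (v : Int) :
    ships.count v = (List.range ships.length).countP (fun k => ships.getD k 0 == v) := by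
  have hrepr : (List.range ships.length).map (fun k => ships.getD k 0) = ships := by
    apply List.ext_getElem
    · simp
    · intro i h1 h2
      simp [List.getD_eq_getElem?_getD, List.getElem?_eq_getElem h2]
  conv_lhs => rw [← hrepr]
  rw [List.count_eq_countP, List.countP_map]
  rfl

lemma pv_cOf_le (ships : List Int) (r : List Bool) (v : Int) :
    cOf ships r v ≤ ships.count v := by
  rw [pv_count_eq]
  unfold cOf
  apply List.countP_mono_left
  intro x _ hx
  simp only [Bool.and_eq_true] at hx
  exact hx.2

lemma pv_getD_set (r : List Bool) (k j : Nat) (hk : k < r.length) :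
    (r.set k true).getD j false = if j = k then true else r.getD j false := by
  by_cases h : j = k
  · subst h
    simp [List.getD_eq_getElem?_getD, List.getElem?_set, hk]
  · simp [List.getD_eq_getElem?_getD, List.getElem?_set, Ne.symm h, h]

lemma pv_cOf_set (ships : List Int) (r : List Bool) (k : Nat) (hk : k < ships.length)
    (hlen : r.length = ships.length) (hfalse : r.getD k false = false) (v : Int) :
    cOf ships (r.set k true) v =
      if ships.getD k 0 = v then cOf ships r v + 1 else cOf ships r v := by
  have hkr : k < r.length := by omega
  unfold cOf
  by_cases hv : ships.getD k 0 = v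
  · rw [if_pos hv]
    apply pv_countP_range_bump hk
    · intro j hj
      rw [pv_getD_set r k j hkr, if_neg hj]
    · rw [Bool.and_eq_false_iff]
      left
      exact hfalse
    · rw [pv_getD_set r k k hkr, if_pos rfl, Bool.true_and, beq_iff_eq]
      exact hv
  · rw [if_neg hv]
    apply List.countP_congr
    intro j hj
    rw [pv_getD_set r k j hkr]
    by_cases hjk : j = k
    · subst hjk
      rw [if_pos rfl, hfalse]
      constructor
      · intro h
        rw [Bool.true_and, beq_iff_eq] at h
        exact absurd h hv
      · intro h
        rw [Bool.false_and] at h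
        exact absurd h (by simp)
    · rw [if_neg hjk]

lemma pv_rmMany_zero (ships : List Int) (c : Int → Nat) (h : ∀ v, c v = 0) :
    rmMany ships c = ships := by
  induction ships with
  | nil => rfl
  | cons x xs ih =>
      unfold rmMany
      rw [if_neg (by simp [h x]), ih]

lemma pv_cOf_replicate (ships : List Int) (v : Int) :
    cOf ships (List.replicate ships.length false) v = 0 := by
  unfold cOf
  rw [List.countP_eq_zero]
  intro j hj
  simp only [List.mem_range] at hj
  simp [List.getD_replicate, hj]

lemma pv_rmMany_cons_pos (x : Int) (xs : List Int) (c : Int → Nat) (h : 0 < c x) :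
    rmMany (x :: xs) c = rmMany xs (fun v => if v = x then c v - 1 else c v) := by
  rw [rmMany, if_pos h]

lemma pv_rmMany_cons_neg (x : Int) (xs : List Int) (c : Int → Nat) (h : c x = 0) :
    rmMany (x :: xs) c = x :: rmMany xs c := by
  rw [rmMany, if_neg (by omega)]

lemma pv_remove_rmMany (ships : List Int) (c : Int → Nat) (v : Int)
    (h : c v < ships.count v) :
    PySem.List.remove? (rmMany ships c) v
      = some (rmMany ships (fun w => if w = v then c w + 1 else c w)) := by
  induction ships generalizing c with
  | nil => simp at h
  | cons x xs ih =>
      by_cases hx : 0 < c x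
      · by_cases hxv : x = v
        · subst hxv
          have hcx : (fun w => if w = x then c w - 1 else c w) x < xs.count x := by
            have hh := h
            rw [List.count_cons_self] at hh
            show (if x = x then c x - 1 else c x) < xs.count x
            rw [if_pos rfl]
            omega
          rw [pv_rmMany_cons_pos x xs c hx, ih _ hcx,
              pv_rmMany_cons_pos x xs _ (by simp),
              show (fun w => if w = x then (fun w => if w = x then c w - 1 else c w) w + 1
                    else (fun w => if w = x then c w - 1 else c w) w)
                  = (fun v_1 => if v_1 = x then (fun w => if w = x then c w + 1 else c w) v_1 - 1
                    else (fun w => if w = x then c w + 1 else c w) v_1) from by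
                funext w; by_cases hw : w = x <;> simp [hw] <;> omega]
        · have hcv : c v < xs.count v := by
            rw [List.count_cons] at h
            simpa [hxv] using h
          rw [pv_rmMany_cons_pos x xs c hx,
              ih _ (by simpa [show ¬v = x from fun hh => hxv hh.symm] using hcv),
              pv_rmMany_cons_pos x xs _ (by simp [hxv]; omega),
              show (fun w => if w = v then (fun u => if u = x then c u - 1 else c u) w + 1
                    else (fun u => if u = x then c u - 1 else c u) w)
                  = (fun v_1 => if v_1 = x then (fun w => if w = v then c w + 1 else c w) v_1 - 1
                    else (fun w => if w = v then c w + 1 else c w) v_1) from by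
                funext u
                by_cases hu : u = x <;> by_cases hu2 : u = v <;>
                  simp [hu, hu2, hxv] <;> simp_all <;> omega]
      · have hcx : c x = 0 := by omega
        by_cases hxv : x = v
        · subst hxv
          rw [pv_rmMany_cons_neg x xs c hcx, PySem.List.remove?_cons_self,
              pv_rmMany_cons_pos x xs _ (by simp),
              show (fun v_1 => if v_1 = x then (fun w => if w = x then c w + 1 else c w) v_1 - 1
                    else (fun w => if w = x then c w + 1 else c w) v_1) = c from by
                funext w; by_cases hw : w = x <;> simp [hw]]
        · have hcv : c v < xs.count v := by
            rw [List.count_cons] at h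
            simpa [hxv] using h
          rw [pv_rmMany_cons_neg x xs c hcx, PySem.List.remove?_cons_of_ne _ hxv, ih c hcv,
              pv_rmMany_cons_neg x xs _ (by simp [hxv, hcx])]
          rfl

lemma pvStep_eq (ships : List Int) (st : List Int × List Bool) (cell : String) (k : Int) :
    (if PySem.Str.isIn (PySem.Int.toStr k) cell && !(PySem.List.pyGetD st.2 k false) then
       ((PySem.List.remove? st.1 (PySem.List.pyGetD ships k 0)).getD st.1,
        PySem.List.pySetD st.2 k true)
     else st) = pvStep ships st (cell, k) := rfl

lemma pv_inv (ships : List Int) (P : List (String × Int)) :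
    ∀ r : List Bool, r.length = ships.length →
      (∀ q ∈ P, 0 ≤ q.2 ∧ q.2 < (ships.length : Int)) →
      P.foldl (pvStep ships) (rmMany ships (cOf ships r), r)
        = (rmMany ships (cOf ships (P.foldl pvFlagStep r)), P.foldl pvFlagStep r) := by
  induction P with
  | nil => intro r _ _; simp
  | cons q P ih =>
      intro r hlen hq
      obtain ⟨hq0, hqn⟩ := hq q (List.mem_cons_self)
      have hqtail : ∀ p ∈ P, 0 ≤ p.2 ∧ p.2 < (ships.length : Int) := by
        intro p hp; exact hq p (List.mem_cons_of_mem _ hp)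
      set k := q.2.toNat with hkdef
      have hkq : (k : Int) = q.2 := Int.toNat_of_nonneg hq0
      have hkn : k < ships.length := by omega
      have hkr : k < r.length := by omega
      have hget : PySem.List.pyGetD r q.2 false = r.getD k false := by
        rw [PySem.List.pyGetD_eq_getElem r false hq0 (by omega), List.getD_eq_getElem r false hkr]
      have hships : PySem.List.pyGetD ships q.2 0 = ships.getD k 0 := by
        rw [PySem.List.pyGetD_eq_getElem ships 0 hq0 (by omega), List.getD_eq_getElem ships 0 hkn]
      simp only [List.foldl_cons]
      by_cases hc : (PySem.Str.isIn (PySem.Int.toStr q.2) q.1 && !(PySem.List.pyGetD r q.2 false)) = true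
      · have hfalse : r.getD k false = false := by
          simp only [Bool.and_eq_true, Bool.not_eq_eq_eq_not, Bool.not_true] at hc
          rw [← hget]; exact hc.2
        have hlt : cOf ships r (ships.getD k 0) < ships.count (ships.getD k 0) := by
          have h1 := pv_cOf_set ships r k hkn hlen hfalse (ships.getD k 0)
          rw [if_pos rfl] at h1
          have h2 := pv_cOf_le ships (r.set k true) (ships.getD k 0)
          omega
        have hstep : pvStep ships (rmMany ships (cOf ships r), r) q
            = (rmMany ships (cOf ships (r.set k true)), r.set k true) := by
          unfold pvStep
          rw [if_pos hc]
          simp only [hships]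
          rw [pv_remove_rmMany ships (cOf ships r) (ships.getD k 0) hlt]
          simp only [Option.getD_some]
          rw [PySem.List.pySetD_of_nonneg r true hq0, ← hkdef]
          congr 2
          funext w
          rw [pv_cOf_set ships r k hkn hlen hfalse w]
          by_cases hw : w = ships.getD k 0
          · rw [if_pos hw, if_pos hw.symm]
          · rw [if_neg hw, if_neg (fun hh => hw hh.symm)]
        have hflag : pvFlagStep r q = r.set k true := by
          unfold pvFlagStep
          rw [if_pos hc, PySem.List.pySetD_of_nonneg r true hq0]
        rw [hstep, hflag, ih (r.set k true) (by simp [hlen]) hqtail]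
      · have hstep : pvStep ships (rmMany ships (cOf ships r), r) q
            = (rmMany ships (cOf ships r), r) := by
          unfold pvStep; rw [if_neg hc]
        have hflag : pvFlagStep r q = r := by
          unfold pvFlagStep; rw [if_neg hc]
        rw [hstep, hflag, ih r hlen hqtail]

lemma pv_flag_len (P : List (String × Int)) :
    ∀ r : List Bool, (P.foldl pvFlagStep r).length = r.length := by
  induction P with
  | nil => intro r; rfl
  | cons q P ih =>
      intro r
      simp only [List.foldl_cons]
      rw [ih]
      unfold pvFlagStep
      split
      · rw [PySem.List.length_pySetD]
      · rfl

lemma pv_flag_getD (P : List (String × Int)) :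
    ∀ r : List Bool, (∀ q ∈ P, 0 ≤ q.2 ∧ q.2 < (r.length : Int)) → ∀ j, j < r.length →
      (P.foldl pvFlagStep r).getD j false
        = (r.getD j false
           || P.any (fun q => q.2 == (j : Int) && PySem.Str.isIn (PySem.Int.toStr q.2) q.1)) := by
  induction P with
  | nil => intro r _ j _; simp
  | cons q P ih =>
      intro r hq j hj
      obtain ⟨hq0, hqn⟩ := hq q List.mem_cons_self
      have hqtail : ∀ p ∈ P, 0 ≤ p.2 ∧ p.2 < (r.length : Int) :=
        fun p hp => hq p (List.mem_cons_of_mem _ hp)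
      set k := q.2.toNat with hkdef
      have hkq : (k : Int) = q.2 := Int.toNat_of_nonneg hq0
      have hkr : k < r.length := by omega
      have hget : PySem.List.pyGetD r q.2 false = r.getD k false := by
        rw [PySem.List.pyGetD_eq_getElem r false hq0 (by omega), List.getD_eq_getElem r false hkr]
      simp only [List.foldl_cons, List.any_cons]
      by_cases hc : (PySem.Str.isIn (PySem.Int.toStr q.2) q.1 && !(PySem.List.pyGetD r q.2 false)) = true
      · have hflag : pvFlagStep r q = r.set k true := by
          unfold pvFlagStep
          rw [if_pos hc, PySem.List.pySetD_of_nonneg r true hq0]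
        obtain ⟨hvis, hrf⟩ : PySem.Str.isIn (PySem.Int.toStr q.2) q.1 = true
            ∧ PySem.List.pyGetD r q.2 false = false := by
          simpa using hc
        rw [hflag, ih (r.set k true)
              (by intro p hp
                  rw [List.length_set]
                  exact hqtail p hp)
              j (by rw [List.length_set]; exact hj)]
        rw [pv_getD_set r k j hkr]
        by_cases hjk : j = k
        · rw [if_pos hjk, hjk]
          have h1 : r.getD k false = false := by rw [← hget]; exact hrf
          have h2 : (q.2 == (k : Int)) = true := by rw [beq_iff_eq, ← hkq]
          rw [h1, h2, hvis]
          simp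
        · rw [if_neg hjk]
          have h2 : (q.2 == (j : Int)) = false := by
            rw [beq_eq_false_iff_ne]
            intro hh
            rw [← hkq] at hh
            exact hjk (by exact_mod_cast hh.symm)
          rw [h2]
          simp
      · have hflag : pvFlagStep r q = r := by
          unfold pvFlagStep
          rw [if_neg hc]
        rw [hflag, ih r hqtail j hj]
        rcases Bool.eq_false_or_eq_true (PySem.Str.isIn (PySem.Int.toStr q.2) q.1) with hvis | hvis
        · have hrt : PySem.List.pyGetD r q.2 false = true := by
            cases hgb : PySem.List.pyGetD r q.2 false
            · exact absurd (by rw [hvis, hgb]; rfl) hc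
            · rfl
          by_cases hjk : j = k
          · have h1 : r.getD j false = true := by rw [hjk, ← hget]; exact hrt
            rw [h1]
            simp
          · have h2 : (q.2 == (j : Int)) = false := by
              rw [beq_eq_false_iff_ne]
              intro hh
              rw [← hkq] at hh
              exact hjk (by exact_mod_cast hh.symm)
            rw [h2]
            simp
        · rw [hvis]
          simp

lemma pv_foldl_flatMap {α β σ : Type} (g : α → List β) (f : σ → β → σ) (l : List α) :
    ∀ st : σ, (l.flatMap g).foldl f st = l.foldl (fun st a => (g a).foldl f st) st := by
  induction l with
  | nil => intro st; rfl
  | cons a l ih =>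
      intro st
      simp only [List.flatMap_cons, List.foldl_append, List.foldl_cons, ih]

lemma pv_take_map (row : List String) (w : Nat) (hw : w ≤ row.length) :
    (PySem.List.pyRange 0 (w : Int) 1).map (fun j => PySem.List.pyGetD row j "") = row.take w := by
  rw [PySem.List.pyRange_zero_nat, List.map_map]
  apply List.ext_getElem
  · simp [hw]
  · intro i h1 h2
    simp only [List.length_map, List.length_range] at h1
    simp [List.getElem?_eq_getElem (by omega : i < row.length)]

lemma pv_any_pair (C : List String) (n j : Nat) (hj : j < n) :
    (pvPairs n C).any
        (fun q => q.2 == (j : Int) && PySem.Str.isIn (PySem.Int.toStr q.2) q.1)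
      = C.any (fun cell => pvVis j cell) := by
  rw [Bool.eq_iff_iff]
  simp only [List.any_eq_true, pvPairs, List.mem_flatMap, List.mem_map, pvVis,
    PySem.List.mem_pyRange_one, Bool.and_eq_true, beq_iff_eq]
  constructor
  · rintro ⟨q, ⟨cell, hcell, k, ⟨hk0, hkn⟩, rfl⟩, hq2, hvis⟩
    exact ⟨cell, hcell, by rw [hq2] at hvis; exact hvis⟩
  · rintro ⟨cell, hcell, hvis⟩
    exact ⟨(cell, (j : Int)), ⟨cell, hcell, (j : Int), ⟨by positivity, by exact_mod_cast hj⟩, rfl⟩,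
      rfl, hvis⟩

lemma pv_bfold (xs : List Int) :
    ∀ (d : PySem.Dict Int Int) (acc : List Int), (∀ v, 0 ≤ d.getD v 0) →
      (xs.foldl (fun st length =>
          if st.1.getD length 0 > 0 then (st.1.insert length (st.1.getD length 0 - 1), st.2)
          else (st.1, st.2 ++ [length])) (d, acc)).2
        = acc ++ rmMany xs (fun v => (d.getD v 0).toNat) := by
  induction xs with
  | nil => intro d acc _; simp [rmMany]
  | cons x xs ih =>
      intro d acc hd
      simp only [List.foldl_cons]
      by_cases hx : d.getD x 0 > 0
      · rw [if_pos hx]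
        rw [ih (d.insert x (d.getD x 0 - 1)) acc
              (by intro v; rw [PySem.Dict.getD_insert]; split
                  · have := hd x; omega
                  · exact hd v)]
        rw [pv_rmMany_cons_pos x xs _ (by omega : 0 < (d.getD x 0).toNat)]
        congr 1
        congr 1
        funext w
        have hdx := hd x
        rw [PySem.Dict.getD_insert]
        by_cases hw : w = x
        · rw [if_pos hw, if_pos hw, hw]
          omega
        · rw [if_neg hw, if_neg hw]
      · rw [if_neg hx]
        have hx0 : d.getD x 0 = 0 := le_antisymm (by omega) (hd x)
        rw [ih d (acc ++ [x]) hd]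
        rw [pv_rmMany_cons_neg x xs _ (by simp [hx0])]
        simp

lemma pv_map_rows {α : Type} (board : List (List String)) (h : List String → α) :
    (PySem.List.pyRange 0 (board.length : Int) 1).map
        (fun i => h (PySem.List.pyGetD board i [])) = board.map h := by
  conv_rhs => rw [← PySem.List.map_pyGetD_pyRange_zero' board []]
  rw [List.map_map]
  rfl

lemma pv_head_getD (board : List (List String)) :
    PySem.List.pyGetD board 0 [] = board.headD [] := by
  cases board with
  | nil => rfl
  | cons r t => rw [PySem.List.pyGetD_zero]; rfl

theorem ships_still_afloat_spec : Claim_equal_ships_still_afloat := by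
  intro ships board _hdom hpre
  unfold Spec_ships_still_afloat
  have hhead : PySem.List.pyGetD board 0 [] = board.headD [] := pv_head_getD board
  set n := ships.length with hn
  set w := (board.headD []).length with hw
  obtain ⟨C, hC⟩ : ∃ C : List String, C = board.flatMap (fun row => row.take w) := ⟨_, rfl⟩
  obtain ⟨R, hR⟩ : ∃ R : List Bool,
      R = (pvPairs n C).foldl pvFlagStep (List.replicate n false) := ⟨_, rfl⟩
  have hbound : ∀ q ∈ pvPairs n C, 0 ≤ q.2 ∧ q.2 < (n : Int) := by
    intro q hq
    rw [pvPairs, List.mem_flatMap] at hq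
    obtain ⟨cell, _, hq⟩ := hq
    rw [List.mem_map] at hq
    obtain ⟨k, hk, rfl⟩ := hq
    rw [PySem.List.mem_pyRange_one] at hk
    exact hk
  -- A reduces to rmMany of the final flags
  have hA : ships_still_afloat ships board = rmMany ships (cOf ships R) := by
    simp only [ships_still_afloat]
    rw [pv_init]
    simp only [PySem.List.len_eq, hhead, ← hw, ← hn, pvStep_eq]
    rw [PySem.List.foldl_pyRange_zero_pyGetD' board []
          (fun st row =>
            (PySem.List.pyRange 0 (w : Int) 1).foldl (fun st j =>
              (PySem.List.pyRange 0 (n : Int) 1).foldl (fun st k =>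
                pvStep ships st (PySem.List.pyGetD row j "", k)) st) st)
          (ships, List.replicate n false)]
    rw [PySem.List.foldl_congr_mem board _
          (fun st row => (row.take w).foldl
            (fun st cell =>
              (PySem.List.pyRange 0 (n : Int) 1).foldl (fun st k => pvStep ships st (cell, k)) st)
            st)
          (ships, List.replicate n false)
          (by intro st row hrow
              dsimp only
              rw [← pv_take_map row w (hpre row hrow), List.foldl_map])]
    rw [← pv_foldl_flatMap (fun row => row.take w)
          (fun st cell =>
            (PySem.List.pyRange 0 (n : Int) 1).foldl (fun st k => pvStep ships st (cell, k)) st)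
          board (ships, List.replicate n false)]
    rw [← hC]
    rw [show (C.foldl (fun st cell =>
            (PySem.List.pyRange 0 (n : Int) 1).foldl (fun st k => pvStep ships st (cell, k)) st)
          (ships, List.replicate n false))
        = (pvPairs n C).foldl (pvStep ships) (ships, List.replicate n false) from by
      rw [pvPairs, pv_foldl_flatMap]
      apply PySem.List.foldl_congr_mem
      intro st cell _
      rw [List.foldl_map]]
    have hships : (ships, List.replicate n false)
        = (rmMany ships (cOf ships (List.replicate n false)), List.replicate n false) := by
      rw [pv_rmMany_zero ships _ (by intro v; rw [hn]; exact pv_cOf_replicate ships v)]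
    rw [hships,
        pv_inv ships (pvPairs n C) (List.replicate n false) (by simp [hn]) hbound, hR]
  -- B reduces to rmMany of the sunk-length counts
  set sunkC : List Int :=
    ((PySem.List.pyRange 0 (n : Int) 1).filter (fun k =>
      C.any (fun cell => PySem.Str.isIn (PySem.Int.toStr k) cell))).map
      (fun k => PySem.List.pyGetD ships k 0) with hsunk
  have hB : ships_still_afloat_alt ships board = rmMany ships (fun v => sunkC.count v) := by
    simp only [ships_still_afloat_alt, PySem.List.len_eq]
    have hwidth : (if board = [] then (0 : Int) else ((PySem.List.pyGetD board 0 []).length : Int))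
        = (w : Int) := by
      cases board with
      | nil => simp [hw]
      | cons r t =>
          rw [if_neg (by simp), hhead, ← hw]
    rw [hwidth]
    have hcells : (PySem.List.pyRange 0 (board.length : Int) 1).flatMap (fun i =>
          (PySem.List.pyRange 0 (w : Int) 1).map (fun j =>
            PySem.List.pyGetD (PySem.List.pyGetD board i []) j "")) = C := by
      rw [List.flatMap_def,
          pv_map_rows board (fun row => (PySem.List.pyRange 0 (w : Int) 1).map (fun j =>
            PySem.List.pyGetD row j ""))]
      rw [List.map_congr_left (fun row hrow => pv_take_map row w (hpre row hrow)),
          ← List.flatMap_def, hC]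
    rw [hcells, ← hn]
    rw [pv_bfold ships _ []
          (by intro v
              rw [PySem.Dict.getD_foldl_insert_add_one, PySem.Dict.getD_empty]
              positivity)]
    rw [List.nil_append]
    congr 1
    funext v
    rw [PySem.Dict.getD_foldl_insert_add_one, PySem.Dict.getD_empty, ← hsunk]
    omega
  rw [hA, hB]
  congr 1
  funext v
  -- both counters count, per index j < n, sunk(j) ∧ ships[j] = v
  have hRlen : R.length = n := by
    rw [hR, pv_flag_len, List.length_replicate]
  have hRget : ∀ j, j < n →
      R.getD j false = C.any (fun cell => pvVis j cell) := by
    intro j hj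
    rw [hR, pv_flag_getD (pvPairs n C) (List.replicate n false)
          (by simpa using hbound) j (by simpa using hj)]
    rw [pv_any_pair C n j hj]
    simp
  rw [cOf, ← hn]
  rw [hsunk, PySem.List.pyRange_zero_nat, List.filter_map, List.map_map]
  rw [List.count_eq_countP, List.countP_map, List.countP_filter]
  apply List.countP_congr
  intro j hj
  rw [List.mem_range] at hj
  simp only [Function.comp_apply, PySem.List.pyGetD_natCast, hRget j hj, pvVis,
    Bool.and_eq_true]
  tauto
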